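-- pv_equiv track=rewrite | github.com/KIOYnBn/NEW-IRAP | irap/Feature.py | create_kmer_dict
-- ===== SOURCE A (Python) =====
-- import itertools
--
-- def create_kmer_dict(simple_raa, kmer):
--     kmer_dcit = {}
--     for i in itertools.product("".join(simple_raa), repeat=kmer):
--         j_str = ""
--         for j in i:
--             j_str = j_str + j
--         kmer_dcit[j_str] = 0
--     return kmer_dcit
-- ===== SOURCE B (Python) =====
-- def create_kmer_dict(simple_raa, kmer):
--     alphabet = "".join(simple_raa)
--     s = len(alphabet)
--     out = {}
--     for n in range(s ** kmer):
--         chars = []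
--         x = n
--         for _ in range(kmer):
--             x, r = divmod(x, s)
--             chars.append(alphabet[r])
--         out["".join(reversed(chars))] = 0
--     return out
-- ===== Notes on version B (the rewrite author's own statement) =====
-- stated objective: alternative
-- what changed: Replaces itertools.product enumeration of character tuples (plus an inner join loop) by a single flat loop over range(len(alphabet)**kmer) that decodes each index into its kmer string by repeated divmod (mixed-radix decoding).
import Mathlib
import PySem

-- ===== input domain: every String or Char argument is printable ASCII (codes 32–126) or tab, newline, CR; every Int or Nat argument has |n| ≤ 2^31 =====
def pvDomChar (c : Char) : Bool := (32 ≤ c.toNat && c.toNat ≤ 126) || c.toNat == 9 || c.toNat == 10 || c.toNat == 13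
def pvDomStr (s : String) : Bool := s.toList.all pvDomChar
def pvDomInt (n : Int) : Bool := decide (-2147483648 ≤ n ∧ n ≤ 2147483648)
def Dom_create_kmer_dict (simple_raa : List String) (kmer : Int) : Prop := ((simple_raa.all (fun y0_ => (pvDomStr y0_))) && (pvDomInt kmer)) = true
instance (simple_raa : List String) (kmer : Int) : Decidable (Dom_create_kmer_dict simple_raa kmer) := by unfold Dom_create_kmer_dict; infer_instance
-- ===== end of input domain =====

-- B replaces itertools.product tuple enumeration by mixed-radix decoding: one flat
-- loop over range(s**kmer) decoding each index into its kmer string by repeated divmod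
-- (objective: alternative; same cost).


-- ===== PORT A =====
-- itertools.product(cs, repeat = n): tuples in lexicographic order, first coordinate
-- varies slowest (ported by hand; exact for repeat = n ≥ 0).
def pvProdA (cs : List Char) : Nat → List (List Char)
  | 0 => [[]]
  | n + 1 => cs.flatMap (fun c => (pvProdA cs n).map (fun t => c :: t))

def create_kmer_dict (simple_raa : List String) (kmer : Int) : List (String × Int) :=
  let cs := PySem.Chars.join [] (simple_raa.map String.toList)  -- "".join(simple_raa)
  ((pvProdA cs kmer.toNat).foldl
      (fun d i => d.insert (String.ofList (i.foldl (fun js j => js ++ [j]) [])) (0 : Int))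
      PySem.Dict.empty).items

-- ===== PORT B =====
-- the inner loop 'for _ in range(kmer): x, r = divmod(x, s); chars.append(alphabet[r])';
-- x, s ≥ 0, so Python's divmod is Nat division, and r = x % s < s = len(alphabet)
-- whenever the body runs (s > 0 there), so alphabet[r] never raises: getD is exact.
def pvInner (cs : List Char) (s : Nat) : Nat → Nat → List Char → List Char
  | _, 0, acc => acc
  | x, k + 1, acc => pvInner cs s (x / s) k (acc ++ [cs.getD (x % s) ' '])

def create_kmer_dict_alt (simple_raa : List String) (kmer : Int) : List (String × Int) :=
  let cs := PySem.Chars.join [] (simple_raa.map String.toList)  -- "".join(simple_raa)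
  let s := cs.length
  ((List.range (s ^ kmer.toNat)).foldl
      (fun d n => d.insert (String.ofList (pvInner cs s n kmer.toNat []).reverse) (0 : Int))
      PySem.Dict.empty).items

-- ===== PRECONDITION & SPEC =====
-- Pre_ excludes kmer < 0, where A raises ValueError (itertools.product rejects a
-- negative repeat); B's range(s ** kmer) raises there too (float power).
def Pre_create_kmer_dict (simple_raa : List String) (kmer : Int) : Prop := 0 ≤ kmer
instance (simple_raa : List String) (kmer : Int) : Decidable (Pre_create_kmer_dict simple_raa kmer) := by unfold Pre_create_kmer_dict; infer_instance
def pvWitness_create_kmer_dict : List String × Int := (["ab"], 2)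

def Spec_create_kmer_dict (simple_raa : List String) (kmer : Int) (out : List (String × Int)) : Prop := out = create_kmer_dict_alt simple_raa kmer
instance (simple_raa : List String) (kmer : Int) (out : List (String × Int)) : Decidable (Spec_create_kmer_dict simple_raa kmer out) := by unfold Spec_create_kmer_dict; infer_instance

-- ===== CLAIM (what is proved, stated in full; the proofs are below) =====
def Claim_equal_create_kmer_dict : Prop := ∀ (simple_raa : List String) (kmer : Int), Dom_create_kmer_dict simple_raa kmer → Pre_create_kmer_dict simple_raa kmer → Spec_create_kmer_dict simple_raa kmer (create_kmer_dict simple_raa kmer)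

-- ===== LEMMAS AND PROOFS =====
-- the digit list B's inner loop accumulates (least-significant digit first)
def pvLow (cs : List Char) (s : Nat) : Nat → Nat → List Char
  | _, 0 => []
  | x, k + 1 => cs.getD (x % s) ' ' :: pvLow cs s (x / s) k

lemma pvInner_eq (cs : List Char) (s : Nat) (k : Nat) :
    ∀ (x : Nat) (acc : List Char), pvInner cs s x k acc = acc ++ pvLow cs s x k := by
  induction k with
  | zero => intro x acc; simp [pvInner, pvLow]
  | succ k ih => intro x acc; simp [pvInner, pvLow, ih]

-- append-at-the-end formulation of the product
def pvGrow (cs : List Char) (ws : List (List Char)) : List (List Char) :=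
  ws.flatMap (fun p => cs.map (fun c => p ++ [c]))

def pvW (cs : List Char) : Nat → List (List Char)
  | 0 => [[]]
  | n + 1 => pvGrow cs (pvW cs n)

lemma pvGrow_map_cons (cs : List Char) (c : Char) (ws : List (List Char)) :
    (pvGrow cs ws).map (fun t => c :: t) = pvGrow cs (ws.map (fun t => c :: t)) := by
  simp [pvGrow, List.map_flatMap, List.flatMap_map, List.map_map, Function.comp_def]

lemma pvGrow_flatMap {α : Type} (cs : List Char) (l : List α) (f : α → List (List Char)) :
    pvGrow cs (l.flatMap f) = l.flatMap (fun a => pvGrow cs (f a)) := by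
  simp [pvGrow, List.flatMap_assoc]

lemma pvComm (cs : List Char) (n : Nat) :
    cs.flatMap (fun c => (pvW cs n).map (fun t => c :: t)) = pvW cs (n + 1) := by
  induction n with
  | zero => simp [pvW, pvGrow, List.map_eq_flatMap]
  | succ n ih =>
    calc cs.flatMap (fun c => (pvW cs (n + 1)).map (fun t => c :: t))
        = cs.flatMap (fun c => pvGrow cs ((pvW cs n).map (fun t => c :: t))) := by
          simp only [pvW, pvGrow_map_cons]
      _ = pvGrow cs (cs.flatMap (fun c => (pvW cs n).map (fun t => c :: t))) := by
          rw [pvGrow_flatMap]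
      _ = pvW cs (n + 1 + 1) := by rw [ih]; rfl

lemma pvProdA_eq_pvW (cs : List Char) (n : Nat) : pvProdA cs n = pvW cs n := by
  induction n with
  | zero => rfl
  | succ n ih => rw [pvProdA, ih, pvComm]

-- map over range(m*s) grouped into s-blocks
lemma pvRangeGroup {α : Type} (s : Nat) (f : Nat → α) (m : Nat) :
    (List.range (m * s)).map f
      = (List.range m).flatMap (fun q => (List.range s).map (fun r => f (q * s + r))) := by
  induction m with
  | zero => simp
  | succ m ih =>
    rw [Nat.succ_mul, List.range_add, List.map_append, ih, List.range_succ,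
      List.flatMap_append]
    simp [List.map_map, Function.comp_def, Nat.add_comm]

lemma pvRangeGetD (cs : List Char) (d : Char) :
    (List.range cs.length).map (fun r => cs.getD r d) = cs := by
  apply List.ext_getElem
  · simp
  · intro i h1 h2
    simp only [List.getElem_map, List.getElem_range]
    rw [List.getD_eq_getElem cs d (by simpa using h2)]

lemma pvMapGetD {α : Type} (cs : List Char) (g : Char → α) :
    cs.map g = (List.range cs.length).map (fun r => g (cs.getD r ' ')) := by
  conv_lhs => rw [← pvRangeGetD cs ' ']
  rw [List.map_map]
  rfl

lemma pvRangeMap (cs : List Char) (k : Nat) :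
    (List.range (cs.length ^ k)).map (fun n => (pvLow cs cs.length n k).reverse)
      = pvW cs k := by
  induction k with
  | zero => simp [pvLow, pvW]
  | succ k ih =>
    rw [pow_succ, pvRangeGroup]
    have hq : ∀ q : Nat,
        (List.range cs.length).map
            (fun r => (pvLow cs cs.length (q * cs.length + r) (k + 1)).reverse)
          = cs.map (fun c => (pvLow cs cs.length q k).reverse ++ [c]) := by
      intro q
      rw [pvMapGetD]
      apply List.map_congr_left
      intro r hr
      rw [List.mem_range] at hr
      have hmod : (q * cs.length + r) % cs.length = r := by
        rw [Nat.add_comm, Nat.add_mul_mod_self_right, Nat.mod_eq_of_lt hr]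
      have hdiv : (q * cs.length + r) / cs.length = q := by
        rcases Nat.eq_zero_or_pos cs.length with h0 | h0
        · exact absurd hr (by omega)
        · rw [Nat.mul_comm, Nat.mul_add_div h0, Nat.div_eq_of_lt hr]
          omega
      simp [pvLow, hmod, hdiv]
    calc (List.range (cs.length ^ k)).flatMap
            (fun q => (List.range cs.length).map
              (fun r => (pvLow cs cs.length (q * cs.length + r) (k + 1)).reverse))
        = (List.range (cs.length ^ k)).flatMap
            (fun q => cs.map (fun c => (pvLow cs cs.length q k).reverse ++ [c])) := by
          simp only [hq]
      _ = pvGrow cs ((List.range (cs.length ^ k)).map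
            (fun n => (pvLow cs cs.length n k).reverse)) := by
          simp [pvGrow, List.flatMap_map]
      _ = pvW cs (k + 1) := by rw [ih]; rfl

lemma pvFoldA (l : List (List Char)) (d : PySem.Dict String Int) :
    l.foldl (fun d i => d.insert (String.ofList i) (0 : Int)) d
      = (l.map String.ofList).foldl (fun d w => d.insert w (0 : Int)) d :=
  (List.foldl_map (f := String.ofList)
    (g := fun (d : PySem.Dict String Int) (w : String) => d.insert w (0 : Int))
    (l := l) (init := d)).symm

lemma pvFoldB (cs : List Char) (k : Nat) (l : List Nat) (d : PySem.Dict String Int) :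
    l.foldl (fun d n => d.insert (String.ofList (pvLow cs cs.length n k).reverse) (0 : Int)) d
      = (l.map (fun n => String.ofList (pvLow cs cs.length n k).reverse)).foldl
          (fun d w => d.insert w (0 : Int)) d :=
  (List.foldl_map (f := fun n => String.ofList (pvLow cs cs.length n k).reverse)
    (g := fun (d : PySem.Dict String Int) (w : String) => d.insert w (0 : Int))
    (l := l) (init := d)).symm

-- ===== VERDICT (by name: the statement is the Claim_ definition above) =====
theorem create_kmer_dict_spec : Claim_equal_create_kmer_dict := by
  intro simple_raa kmer _ _
  unfold Spec_create_kmer_dict create_kmer_dict create_kmer_dict_alt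
  dsimp only
  set cs := PySem.Chars.join [] (simple_raa.map String.toList) with hcs
  simp only [PySem.List.foldl_append_singleton, List.nil_append, pvInner_eq]
  congr 1
  rw [pvFoldA, pvFoldB]
  congr 1
  rw [pvProdA_eq_pvW]
  have h := congrArg (List.map String.ofList) (pvRangeMap cs kmer.toNat)
  rw [List.map_map] at h
  exact h.symm
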